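-- pv_equiv track=rewrite | github.com/Karimoto/Dante-bot | cogs/stat.py | calculate_cata
-- ===== SOURCE A (Python) =====
-- def calculate_cata(xp):
--     if(xp is None):
--         return(None)
--     xp_cumsum = [50,  125,  235,  395,  625,  955, 1425,
--                  2095,  3045,  4385,  6275,  8940, 12700, 17960,
--                  25340,  35640,  50040,  70040,  97640, 135640, 188140,
--                  259640, 356640,  488640,  668640,  911640, 1239640, 1684640,
--                  2284640, 2364640,  3429640,  4839640,  6739640,  9239640, 12539640,
--                  16839640, 22439640,  29639640,  38839640,  50839640,  65839640,  84839640,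
--                  108839640, 138839640]
--     return(sum([xp>i for i in xp_cumsum]))
-- ===== SOURCE B (Python) =====
-- def calculate_cata(xp):
--     if xp is None:
--         return None
--     thresholds = [50,  125,  235,  395,  625,  955, 1425,
--                   2095,  3045,  4385,  6275,  8940, 12700, 17960,
--                   25340,  35640,  50040,  70040,  97640, 135640, 188140,
--                   259640, 356640,  488640,  668640,  911640, 1239640, 1684640,
--                   2284640, 2364640,  3429640,  4839640,  6739640,  9239640, 12539640,
--                   16839640, 22439640,  29639640,  38839640,  50839640,  65839640,  84839640,
--                   108839640, 138839640]
--     # binary search: count of thresholds strictly below xp = leftmost insertion point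
--     lo, hi = 0, len(thresholds)
--     while lo < hi:
--         mid = (lo + hi) // 2
--         if thresholds[mid] < xp:
--             lo = mid + 1
--         else:
--             hi = mid
--     return lo
-- ===== Notes on version B (the rewrite author's own statement) =====
-- stated objective: alternative
-- what changed: Replaced the full linear scan summing 44 boolean indicators with a hand-written binary search (bisect_left) over the same ascending threshold array, returning the count of thresholds strictly below xp in at most 6 comparisons.
import Mathlib
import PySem

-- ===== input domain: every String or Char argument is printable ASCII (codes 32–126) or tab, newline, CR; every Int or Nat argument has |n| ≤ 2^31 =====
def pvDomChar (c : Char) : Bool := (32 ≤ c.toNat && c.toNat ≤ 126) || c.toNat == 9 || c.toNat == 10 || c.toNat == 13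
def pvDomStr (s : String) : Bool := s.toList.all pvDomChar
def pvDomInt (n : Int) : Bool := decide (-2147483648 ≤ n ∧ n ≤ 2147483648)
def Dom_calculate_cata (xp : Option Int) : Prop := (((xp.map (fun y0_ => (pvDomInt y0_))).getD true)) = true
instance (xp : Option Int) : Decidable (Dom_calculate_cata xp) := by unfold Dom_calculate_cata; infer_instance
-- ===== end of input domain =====

-- B replaces A's linear indicator-sum over the fixed ascending threshold table by a binary
-- search (bisect_left) over the same table; same return value everywhere (alternative algorithm).

-- the fixed ascending threshold table (identical literal in A and B)
def xpCumsum : List Int :=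
  [50,  125,  235,  395,  625,  955, 1425,
   2095,  3045,  4385,  6275,  8940, 12700, 17960,
   25340,  35640,  50040,  70040,  97640, 135640, 188140,
   259640, 356640,  488640,  668640,  911640, 1239640, 1684640,
   2284640, 2364640,  3429640,  4839640,  6739640,  9239640, 12539640,
   16839640, 22439640,  29639640,  38839640,  50839640,  65839640,  84839640,
   108839640, 138839640]

-- ===== PORT A =====
def calculate_cata (xp : Option Int) : Option Int :=
  match xp with
  | none => none
  | some x =>
    -- sum([xp > i for i in xp_cumsum]) : Python bools count as 0/1 in sum
    some ((xpCumsum.map (fun i => if x > i then (1 : Int) else 0)).sum)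

-- ===== PORT B =====
-- the while-loop of Source B: lo, hi updated by binary search, returns lo when lo = hi
def bisectGo (a : List Int) (x : Int) (lo hi : Nat) : Nat :=
  if lo < hi then
    let mid := (lo + hi) / 2
    if a.getD mid 0 < x then bisectGo a x (mid + 1) hi
    else bisectGo a x lo mid
  else lo
termination_by hi - lo
decreasing_by all_goals omega

def calculate_cata_alt (xp : Option Int) : Option Int :=
  match xp with
  | none => none
  | some x => some ((bisectGo xpCumsum x 0 xpCumsum.length : Nat) : Int)

-- ===== PRECONDITION & SPEC =====
def Spec_calculate_cata (xp : Option Int) (out : Option Int) : Prop := out = calculate_cata_alt xp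
instance (xp : Option Int) (out : Option Int) : Decidable (Spec_calculate_cata xp out) := by unfold Spec_calculate_cata; infer_instance

-- ===== CLAIM (what is proved, stated in full; the proofs are below) =====
def Claim_equal_calculate_cata : Prop := ∀ (xp : Option Int), Dom_calculate_cata xp → Spec_calculate_cata xp (calculate_cata xp)

-- ===== LEMMAS AND PROOFS =====

theorem pvGetD_eq (l : List Int) (i : Nat) (h : i < l.length) : l.getD i 0 = l[i] := by
  simp [List.getD_eq_getElem?_getD, List.getElem?_eq_getElem h]

-- A's indicator sum is the countP of elements strictly below x
theorem sum_indicator_eq_countP (x : Int) (l : List Int) :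
    (l.map (fun i => if x > i then (1 : Int) else 0)).sum
      = ((l.countP (fun i => decide (i < x)) : Nat) : Int) := by
  induction l with
  | nil => simp
  | cons a t ih =>
    simp only [List.map_cons, List.sum_cons, List.countP_cons, ih]
    by_cases h : a < x <;> simp [h, gt_iff_lt]
    ring

-- countP of a list whose first r elements satisfy the predicate and whose remaining
-- elements do not, equals r
theorem countP_of_split (x : Int) :
    ∀ (l : List Int) (r : Nat), r ≤ l.length →
    (∀ i, i < r → l.getD i 0 < x) →
    (∀ i, r ≤ i → i < l.length → ¬ l.getD i 0 < x) →
    l.countP (fun i => decide (i < x)) = r := by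
  intro l
  induction l with
  | nil => intro r hr _ _; simp only [List.countP_nil, List.length_nil] at hr ⊢; omega
  | cons a t ih =>
    intro r hr h1 h2
    cases r with
    | zero =>
      rw [List.countP_eq_zero]
      intro b hb
      rcases List.mem_iff_getElem.mp hb with ⟨i, hi, rfl⟩
      have := h2 i (Nat.zero_le _) (by simpa using hi)
      rw [pvGetD_eq _ _ hi] at this
      simpa using this
    | succ s =>
      have ha : a < x := by simpa using h1 0 (Nat.succ_pos s)
      have ht : t.countP (fun i => decide (i < x)) = s := by
        apply ih s (by simpa using hr)
        · intro i hi; simpa using h1 (i + 1) (by omega)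
        · intro i hi hlen; simpa using h2 (i + 1) (by omega) (by simpa using hlen)
      simp [ha, ht]

-- characterization of the binary-search loop on a sorted list
theorem bisectGo_spec (a : List Int) (x : Int)
    (hs : a.Pairwise (· ≤ ·)) :
    ∀ (lo hi : Nat), lo ≤ hi → hi ≤ a.length →
    (∀ i, i < lo → a.getD i 0 < x) →
    (∀ i, hi ≤ i → i < a.length → ¬ a.getD i 0 < x) →
    a.countP (fun i => decide (i < x)) = bisectGo a x lo hi := by
  have hmono : ∀ i j, i ≤ j → j < a.length → a.getD i 0 ≤ a.getD j 0 := by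
    intro i j hij hj
    have hi : i < a.length := lt_of_le_of_lt (by omega) hj
    rcases Nat.lt_or_ge i j with h | h
    · have := (List.pairwise_iff_getElem.mp hs) i j hi hj h
      rwa [pvGetD_eq _ _ hi, pvGetD_eq _ _ hj]
    · have : i = j := by omega
      subst this; rfl
  intro lo hi
  induction lo, hi using bisectGo.induct a x with
  | case1 lo hi hlt mid hm ih =>
    intro hlohi hhi h1 h2
    rw [bisectGo]
    simp only [if_pos hlt]
    have hmidlt : mid < hi := by omega
    have hmidge : lo ≤ mid := by omega
    rw [if_pos hm]
    exact ih (by omega) hhi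
      (fun i hilt => lt_of_le_of_lt (hmono i mid (by omega) (by omega)) hm)
      h2
  | case2 lo hi hlt mid hm ih =>
    intro hlohi hhi h1 h2
    rw [bisectGo]
    simp only [if_pos hlt]
    rw [if_neg hm]
    exact ih (by omega) (by omega) h1
      (fun i hle hilen => fun hcon =>
        hm (lt_of_le_of_lt (hmono mid i hle hilen) hcon))
  | case3 lo hi hnlt =>
    intro hlohi hhi h1 h2
    rw [bisectGo, if_neg hnlt]
    have : lo = hi := by omega
    subst this
    exact countP_of_split x a lo (by omega) h1 (fun i hle hilen => h2 i hle hilen)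

theorem xpCumsum_sorted : xpCumsum.Pairwise (· ≤ ·) := by decide

-- ===== VERDICT (by name: the statement is the Claim_ definition above) =====
theorem calculate_cata_spec : Claim_equal_calculate_cata := by
  intro xp _
  unfold Spec_calculate_cata
  match xp with
  | none => rfl
  | some x =>
    simp only [calculate_cata, calculate_cata_alt]
    rw [sum_indicator_eq_countP x xpCumsum,
        bisectGo_spec xpCumsum x xpCumsum_sorted 0 xpCumsum.length
          (Nat.zero_le _) le_rfl (fun i hi => absurd hi (Nat.not_lt_zero i))
          (fun i hle hilen => absurd hilen (by omega))]
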